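-- pv_equiv track=rewrite | github.com/jitendra29mishra/Google_foobar_Challenge | 1/1_2_cake_is_not_a_lie.py | answer
-- ===== SOURCE A (Python) =====
-- def answer(s):
--     len_s = len(s)
--     factorial = (i for i in range(1, len_s+1) if len_s%i == 0)
--
--     for i in factorial:
--         pieces = int(len_s / i)
--         if all([s[j:j+i]==s[:i] for j in range(0, len_s, i)]):
--             return pieces
--     return 1
-- ===== SOURCE B (Python) =====
-- def answer(s):
--     # Smallest cyclic period via the classic doubled-string trick:
--     # the least p >= 1 with (s+s)[p:p+n] == s divides n, and n // p is
--     # the maximal number of equal pieces s splits into.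
--     n = len(s)
--     if n == 0:
--         return 1
--     p = (s + s).find(s, 1)
--     return n // p if p < n else 1
-- ===== Notes on version B (the rewrite author's own statement) =====
-- stated objective: faster
-- what changed: Replaces the divisor scan with quadratic chunk comparisons by the doubled-string trick: the least index p >= 1 at which s occurs in s+s is the smallest period, so the answer is n//p (1 if p == n).
import Mathlib
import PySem

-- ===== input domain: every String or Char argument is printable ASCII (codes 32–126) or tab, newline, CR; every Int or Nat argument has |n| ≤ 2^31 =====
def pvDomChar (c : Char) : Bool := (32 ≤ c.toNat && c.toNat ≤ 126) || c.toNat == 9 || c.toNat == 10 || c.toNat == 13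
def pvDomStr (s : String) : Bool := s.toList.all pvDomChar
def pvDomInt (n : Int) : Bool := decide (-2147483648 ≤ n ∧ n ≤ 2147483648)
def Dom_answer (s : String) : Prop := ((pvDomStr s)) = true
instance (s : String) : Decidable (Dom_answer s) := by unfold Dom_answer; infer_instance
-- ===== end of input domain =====

-- B replaces A's divisor scan with quadratic chunk checks by one substring search in s+s
-- (smallest period); proved to return the same value on every string.

-- ===== PORT A =====
-- all([s[j:j+i]==s[:i] for j in range(0, len_s, i)])
def pvChunkB (l : List Char) (len_s i : Int) : Bool :=
  ((PySem.List.pyRange 0 len_s i).map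
      (fun j => PySem.List.slice l (some j) (some (j + i)) == PySem.List.slice l none (some i))).all
    (fun b => b)

-- the 'for i in factorial' loop; 'int(len_s / i)' is exact here (i divides len_s, quotient ≤ 2^31 < 2^53),
-- so it is ported as floor division
def pvLoopA (l : List Char) (len_s : Int) : List Int → Int
  | [] => 1
  | i :: rest =>
      if pvChunkB l len_s i then PySem.Int.floordiv len_s i else pvLoopA l len_s rest

def answer (s : String) : Int :=
  let l := s.toList
  let len_s : Int := PySem.Str.len s
  pvLoopA l len_s
    ((PySem.List.pyRange 1 (len_s + 1) 1).filter (fun i => PySem.Int.mod len_s i == 0))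

-- ===== PORT B =====
def answer_alt (s : String) : Int :=
  let n : Int := PySem.Str.len s
  if n == 0 then 1
  else
    -- (s + s).find(s, 1): Str.findFrom is Chars.findFrom on the code points, and (s+s) has code points s.toList ++ s.toList
    let p : Int := PySem.Chars.findFrom (s.toList ++ s.toList) s.toList 1
    if p < n then PySem.Int.floordiv n p else 1

-- ===== PRECONDITION & SPEC =====
def Spec_answer (s : String) (out : Int) : Prop := out = answer_alt s
instance (s : String) (out : Int) : Decidable (Spec_answer s out) := by unfold Spec_answer; infer_instance

-- ===== CLAIM (what is proved, stated in full; the proofs are below) =====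
def Claim_equal_answer : Prop := ∀ (s : String), Dom_answer s → Spec_answer s (answer s)

-- ===== LEMMAS AND PROOFS =====

-- 'l has cyclic period p'
def pvCyc (l : List Char) (p : Nat) : Prop := l.rotate p = l

theorem pvCyc_mul (l : List Char) (p k : Nat) (h : pvCyc l p) : pvCyc l (k * p) := by
  induction k with
  | zero => simp [pvCyc]
  | succ k ih =>
      have := List.rotate_rotate l (k * p) p
      rw [ih, h] at this
      unfold pvCyc
      rw [Nat.succ_mul, ← this]

theorem pvCyc_sub (l : List Char) (p q : Nat) (hqp : q ≤ p)
    (hp : pvCyc l p) (hq : pvCyc l q) : pvCyc l (p - q) := by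
  have h := List.rotate_rotate l q (p - q)
  rw [hq, Nat.add_sub_cancel' hqp, hp] at h
  exact h

theorem pvCyc_mod (l : List Char) (p q : Nat) (hp : pvCyc l p) (hq : pvCyc l q) :
    pvCyc l (p % q) := by
  have h1 := pvCyc_mul l q (p / q) hq
  have h3 := pvCyc_sub l p (p / q * q) (Nat.div_mul_le_self p q) hp (by rwa [Nat.mul_comm] at h1 ⊢)
  have hdm := Nat.div_add_mod p q
  have he : p - p / q * q = p % q := by
    rw [Nat.mul_comm]
    generalize hC : q * (p / q) = C at hdm ⊢
    omega
  rwa [he] at h3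

theorem pv_prefix_iff_cyc (l : List Char) (p : Nat) (hp : p ≤ l.length) :
    (l <+: (l ++ l).drop p) ↔ pvCyc l p := by
  rw [List.drop_append_of_le_length hp, List.prefix_iff_eq_take, pvCyc,
    List.rotate_eq_drop_append_take hp]
  have hlen : l.length = (l.length - p) + p := by omega
  have hdl : (l.drop p).length = l.length - p := by simp
  constructor
  · intro h
    conv at h => rw [hlen, List.take_add]
    rw [List.take_append_of_le_length hdl.ge, List.take_of_length_le hdl.le,
      List.drop_append_of_le_length hdl.ge, List.drop_of_length_le hdl.le,
      List.nil_append] at h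
    exact h.symm
  · intro h
    conv_lhs => rw [← h]
    rw [hlen, List.take_add,
      List.take_append_of_le_length hdl.ge, List.take_of_length_le hdl.le,
      List.drop_append_of_le_length hdl.ge, List.drop_of_length_le hdl.le,
      List.nil_append]

-- the facts delivered by (s+s).find(s, 1): its result m is the least cyclic period, 1 ≤ m ≤ n
theorem pv_find_facts (l : List Char) (hl : l ≠ []) :
    ∃ m : Nat, PySem.Chars.findFrom (l ++ l) l 1 = (m : Int) ∧ 1 ≤ m ∧ m ≤ l.length ∧
      pvCyc l m ∧ ∀ q : Nat, 1 ≤ q → q < m → ¬ pvCyc l q := by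
  have hn : 1 ≤ l.length := List.length_pos_of_ne_nil hl
  have hk : (1 : Nat) ≤ (l ++ l).length := by simp; omega
  have hcast : (1 : Int) = ((1 : Nat) : Int) := by norm_num
  rw [hcast]
  have hne : PySem.Chars.findFrom (l ++ l) l ((1 : Nat) : Int) ≠ -1 := by
    intro hcon
    refine (PySem.Chars.findFrom_natCast_eq_neg_one_iff (l ++ l) l 1 hk).mp hcon ?_
    rw [List.drop_append_of_le_length hn]
    exact (List.suffix_append (l.drop 1) l).isInfix
  obtain ⟨hge, hpre, hmin⟩ := PySem.Chars.findFrom_natCast_spec (l ++ l) l 1 hk hne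
  set r := PySem.Chars.findFrom (l ++ l) l ((1 : Nat) : Int) with hr
  have hr0 : 0 ≤ r := le_trans (by norm_num) hge
  refine ⟨r.toNat, (Int.toNat_of_nonneg hr0).symm, ?_, ?_, ?_, ?_⟩
  · omega
  · by_contra hcon
    push Not at hcon
    exact hmin l.length hn hcon (by rw [List.drop_left])
  · exact (pv_prefix_iff_cyc l r.toNat (by
      by_contra hcon
      push Not at hcon
      exact hmin l.length hn hcon (by rw [List.drop_left]))).mp hpre
  · intro q hq1 hqm hcyc
    have hql : q ≤ l.length := by
      by_contra hcon
      push Not at hcon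
      have hml : r.toNat ≤ l.length := by
        by_contra hcon2
        push Not at hcon2
        exact hmin l.length hn hcon2 (by rw [List.drop_left])
      omega
    exact hmin q hq1 hqm ((pv_prefix_iff_cyc l q hql).mpr hcyc)

theorem pv_cyc_to_chunks (l : List Char) (i k : Nat) (hc : pvCyc l i)
    (hk : (k + 1) * i ≤ l.length) : (l.drop (k * i)).take i = l.take i := by
  have hc' := pvCyc_mul l i k hc
  have hk' : k * i + i ≤ l.length := by rw [Nat.succ_mul] at hk; omega
  have heq : l.drop (k * i) ++ l.take (k * i) = l := by
    rw [← List.rotate_eq_drop_append_take (by omega)]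
    exact hc'
  have h2 := congrArg (List.take i) heq
  rwa [List.take_append_of_le_length (by simp; omega)] at h2

theorem pv_chunks_to_rep (l : List Char) (i : Nat) (hdvd : i ∣ l.length)
    (hch : ∀ k : Nat, k < l.length / i → (l.drop (k * i)).take i = l.take i) :
    l = (List.replicate (l.length / i) (l.take i)).flatten := by
  suffices haux : ∀ j, j ≤ l.length / i → l.take (j * i) = (List.replicate j (l.take i)).flatten by
    have h := haux (l.length / i) le_rfl
    rwa [Nat.div_mul_cancel hdvd, List.take_length] at h
  intro j
  induction j with
  | zero => simp
  | succ j ih =>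
      intro hj
      rw [Nat.succ_mul, List.take_add, ih (by omega), hch j (by omega),
        List.replicate_succ', List.flatten_append]
      simp

theorem pv_rep_comm (t : List Char) (j : Nat) :
    (List.replicate j t).flatten ++ t = t ++ (List.replicate j t).flatten := by
  induction j with
  | zero => simp
  | succ j ih =>
      rw [List.replicate_succ, List.flatten_cons, List.append_assoc, ih]

theorem pv_rep_cyc (t : List Char) (q : Nat) :
    ((List.replicate (q + 1) t).flatten).rotate t.length = (List.replicate (q + 1) t).flatten := by
  have hlen : t.length ≤ ((List.replicate (q + 1) t).flatten).length := by
    simp [Nat.succ_mul]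
  rw [List.rotate_eq_drop_append_take hlen]
  rw [List.replicate_succ, List.flatten_cons, List.drop_left, List.take_left]
  exact pv_rep_comm t q

theorem pv_rep_to_cyc (l : List Char) (i : Nat) (hi : 1 ≤ i) (hin : i ≤ l.length)
    (hrep : l = (List.replicate (l.length / i) (l.take i)).flatten) :
    pvCyc l i := by
  have hlt : (l.take i).length = i := by simp; omega
  obtain ⟨q', hq'⟩ : ∃ q', l.length / i = q' + 1 :=
    ⟨l.length / i - 1, by
      have h1 : 1 ≤ l.length / i := (Nat.one_le_div_iff (by omega)).mpr hin
      omega⟩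
  have h := pv_rep_cyc (l.take i) q'
  rw [hlt] at h
  unfold pvCyc
  rw [hrep, hq']
  exact h

-- A's chunk test at a divisor i is exactly 'l has cyclic period i'
theorem pv_chunkB_iff (l : List Char) (i : Nat) (hi : 1 ≤ i) (hin : i ≤ l.length)
    (hdvd : i ∣ l.length) :
    pvChunkB l (l.length : Int) (i : Int) = true ↔ pvCyc l i := by
  obtain ⟨q, hq⟩ := hdvd
  have hq' : l.length / i = q := by rw [hq]; exact Nat.mul_div_cancel_left q (by omega)
  have hipos : (0 : Int) < (i : Int) := by exact_mod_cast hi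
  have hcount : (((l.length : Int) - 0 + (i : Int) - 1) / (i : Int)) = (q : Int) := by
    have he : ((l.length : Int) - 0 + (i : Int) - 1) = ((i : Int) - 1) + (i : Int) * (q : Int) := by
      push_cast [hq]; ring
    rw [he, Int.add_mul_ediv_left _ _ (by omega), Int.ediv_eq_zero_of_lt (by omega) (by omega)]
    simp
  have helem : ∀ k : Nat,
      ((PySem.List.slice l (some ((0 : Int) + (i : Int) * (k : Int)))
          (some ((0 : Int) + (i : Int) * (k : Int) + (i : Int))) ==
        PySem.List.slice l none (some (i : Int))) = true ↔
        (l.drop (k * i)).take i = l.take i) := by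
    intro k
    have hcast : (0 : Int) + (i : Int) * (k : Int) = ((i * k : Nat) : Int) := by push_cast; ring
    rw [hcast, PySem.List.slice_natCast_add, PySem.List.slice_to_natCast, beq_iff_eq,
      Nat.mul_comm i k]
  unfold pvChunkB
  rw [PySem.List.pyRange_of_pos 0 (l.length : Int) hipos,
    if_pos (by exact_mod_cast Nat.lt_of_lt_of_le (by omega) hin), hcount, Int.toNat_natCast,
    List.all_eq_true]
  constructor
  · intro h
    refine pv_rep_to_cyc l i hi hin (pv_chunks_to_rep l i ⟨q, hq⟩ ?_)
    intro k hk
    rw [hq'] at hk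
    refine (helem k).mp (h _ ?_)
    exact List.mem_map.mpr ⟨(0 : Int) + (i : Int) * (k : Int),
      List.mem_map.mpr ⟨k, List.mem_range.mpr hk, rfl⟩, rfl⟩
  · intro hcyc b hb
    obtain ⟨j, hj, rfl⟩ := List.mem_map.mp hb
    obtain ⟨k, hk, rfl⟩ := List.mem_map.mp hj
    have hk' : (k + 1) * i ≤ l.length := by
      rw [hq, Nat.mul_comm i q]
      exact Nat.mul_le_mul_right i (List.mem_range.mp hk)
    exact (helem k).mpr (pv_cyc_to_chunks l i k hcyc hk')

theorem pv_loop_eq (l : List Char) (m : Nat) :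
    ∀ ds : List Int, ds.Pairwise (· < ·) → (m : Int) ∈ ds →
      (∀ x ∈ ds, x < (m : Int) → pvChunkB l (l.length : Int) x = false) →
      pvChunkB l (l.length : Int) (m : Int) = true →
      pvLoopA l (l.length : Int) ds = PySem.Int.floordiv (l.length : Int) (m : Int) := by
  intro ds
  induction ds with
  | nil => intro _ hmem; simp at hmem
  | cons x rest ih =>
      intro hpw hmem hfail hok
      by_cases hx : pvChunkB l (l.length : Int) x = true
      · have hxm : ¬ x < (m : Int) := fun hlt => by
          rw [hfail x (List.mem_cons_self) hlt] at hx
          exact Bool.false_ne_true hx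
        have hxeq : x = (m : Int) := by
          rcases List.mem_cons.mp hmem with h | h
          · exact h.symm
          · exact absurd ((List.pairwise_cons.mp hpw).1 _ h) hxm
        subst hxeq
        simp [pvLoopA, hx]
      · have hxne : x ≠ (m : Int) := fun he => hx (he ▸ hok)
        have hmem' : (m : Int) ∈ rest := by
          rcases List.mem_cons.mp hmem with h | h
          · exact absurd h.symm hxne
          · exact h
        simp only [pvLoopA, hx, if_false, Bool.false_eq_true]
        exact ih (List.pairwise_cons.mp hpw).2 hmem'
          (fun y hy hlt => hfail y (List.mem_cons_of_mem x hy) hlt) hok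

theorem pv_main (l : List Char) (hl : l ≠ []) :
    pvLoopA l (l.length : Int)
        ((PySem.List.pyRange 1 ((l.length : Int) + 1) 1).filter
          (fun i => PySem.Int.mod (l.length : Int) i == 0))
      = (if PySem.Chars.findFrom (l ++ l) l 1 < (l.length : Int) then
          PySem.Int.floordiv (l.length : Int) (PySem.Chars.findFrom (l ++ l) l 1)
        else 1) := by
  have hn : 1 ≤ l.length := List.length_pos_of_ne_nil hl
  obtain ⟨m, hmr, hm1, hmn, hcyc, hmin⟩ := pv_find_facts l hl
  have hmdvd : m ∣ l.length := by
    rcases Nat.eq_zero_or_pos (l.length % m) with h0 | hpos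
    · exact Nat.dvd_of_mod_eq_zero h0
    · have hc := pvCyc_mod l l.length m (by unfold pvCyc; exact List.rotate_length l) hcyc
      exact absurd hc (hmin _ hpos (Nat.mod_lt _ (by omega)))
  -- A's loop returns len // m
  have hA : pvLoopA l (l.length : Int)
      ((PySem.List.pyRange 1 ((l.length : Int) + 1) 1).filter
        (fun i => PySem.Int.mod (l.length : Int) i == 0))
      = PySem.Int.floordiv (l.length : Int) (m : Int) := by
    apply pv_loop_eq l m
    · exact (PySem.List.pairwise_lt_pyRange_one 1 ((l.length : Int) + 1)).filter _
    · rw [List.mem_filter]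
      constructor
      · rw [PySem.List.mem_pyRange_one]
        constructor
        · exact_mod_cast hm1
        · exact_mod_cast Nat.lt_succ_of_le hmn
      · simp only [beq_iff_eq]
        rw [PySem.Int.mod_eq_zero_iff_dvd]
        exact_mod_cast hmdvd
    · intro x hx hlt
      rw [List.mem_filter, PySem.List.mem_pyRange_one] at hx
      obtain ⟨⟨hx1, hx2⟩, hxdvd⟩ := hx
      simp only [beq_iff_eq, PySem.Int.mod_eq_zero_iff_dvd] at hxdvd
      have hx0 : 0 ≤ x := by omega
      obtain ⟨xn, rfl⟩ : ∃ xn : Nat, x = (xn : Int) := ⟨x.toNat, (Int.toNat_of_nonneg hx0).symm⟩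
      have hxn1 : 1 ≤ xn := by exact_mod_cast hx1
      have hxnn : xn ≤ l.length := by
        have : (xn : Int) < (l.length : Int) + 1 := hx2
        omega
      have hxndvd : xn ∣ l.length := by exact_mod_cast hxdvd
      have hxnm : xn < m := by exact_mod_cast hlt
      rw [Bool.eq_false_iff]
      intro hcon
      exact hmin xn hxn1 hxnm ((pv_chunkB_iff l xn hxn1 hxnn hxndvd).mp hcon)
    · exact (pv_chunkB_iff l m hm1 hmn hmdvd).mpr hcyc
  rw [hA, hmr]
  by_cases hlt : m < l.length
  · rw [if_pos (by exact_mod_cast hlt)]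
  · rw [if_neg (by exact_mod_cast hlt)]
    have hmeq : m = l.length := by omega
    -- len // len = 1 for len ≥ 1
    have h1 : PySem.Int.floordiv ((l.length : Nat) : Int) ((m : Nat) : Int) = 1 := by
      rw [hmeq, PySem.Int.floordiv_eq_iff_of_pos (by exact_mod_cast hn)]
      constructor <;> push_cast <;> omega
    rw [h1]

-- ===== VERDICT (by name: the statement is the Claim_ definition above) =====
theorem answer_spec : Claim_equal_answer := by
  intro s _
  unfold Spec_answer answer answer_alt
  simp only [PySem.Str.len_eq]
  by_cases h : s.toList = []
  · simp [h, pvLoopA, PySem.List.pyRange_one_eq_nil]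
  · have hn : s.toList.length ≠ 0 := by simpa using h
    have hne : ((s.toList.length : Int) == 0) = false := by
      simp only [beq_eq_false_iff_ne, ne_eq]
      intro hc
      exact hn (by exact_mod_cast hc)
    simp only [hne, Bool.false_eq_true, if_false]
    exact pv_main s.toList h
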